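-- pv_equiv track=rewrite | github.com/weiyangzen/awesome_algorithms | Algorithms/数学-数论-0026-莫比乌斯反演公式/demo.py | mobius_inversion
-- ===== SOURCE A (Python) =====
-- def mobius_inversion(f: list[int], mu: list[int]) -> list[int]:
--     """Recover g from f by g(n) = sum_{d|n} mu(d) * f(n/d)."""
--     n = len(f) - 1
--     g = [0] * (n + 1)
--     for d in range(1, n + 1):
--         mud = mu[d]
--         if mud == 0:
--             continue
--         for multiple in range(d, n + 1, d):
--             g[multiple] += mud * f[multiple // d]
--     return g
-- ===== SOURCE B (Python) =====
-- def mobius_inversion(f: list[int], mu: list[int]) -> list[int]: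
--     """Recover g from f by g(n) = sum_{d|n} mu(d) * f(n/d)."""
--     n = len(f) - 1
--     return [sum(mu[d] * f[m // d] for d in range(1, m + 1) if m % d == 0)
--             for m in range(n + 1)]
-- ===== Notes on version B (the rewrite author's own statement) =====
-- stated objective: simpler
-- what changed: Replaces A's sieve-style scatter (for each d with mu[d]!=0, stride over all multiples of d updating g in place) by a direct gather: one comprehension computing each g[m] as the sum over divisors d of m of mu[d]*f[m//d].
import Mathlib
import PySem

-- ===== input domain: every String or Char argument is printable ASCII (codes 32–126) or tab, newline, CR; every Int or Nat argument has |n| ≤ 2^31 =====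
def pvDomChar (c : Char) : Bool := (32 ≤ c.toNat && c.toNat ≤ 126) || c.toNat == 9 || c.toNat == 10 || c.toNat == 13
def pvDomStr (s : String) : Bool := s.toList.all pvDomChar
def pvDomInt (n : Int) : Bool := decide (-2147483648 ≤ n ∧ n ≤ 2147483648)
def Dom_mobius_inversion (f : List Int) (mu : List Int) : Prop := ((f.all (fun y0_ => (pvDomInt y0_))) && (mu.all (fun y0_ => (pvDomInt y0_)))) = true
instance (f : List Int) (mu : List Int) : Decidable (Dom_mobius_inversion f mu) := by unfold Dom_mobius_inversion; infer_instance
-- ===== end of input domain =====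

-- B replaces A's sieve-style scatter over multiples by a direct per-element gather over divisors (simpler: one comprehension, no in-place updates).

-- ===== PORT A =====
def mobius_inversion (f : List Int) (mu : List Int) : List Int :=
  let n : Int := (f.length : Int) - 1
  let g : List Int := List.replicate (n + 1).toNat 0
  (PySem.List.pyRange 1 (n + 1) 1).foldl (fun g d =>
    let mud := PySem.List.pyGetD mu d 0
    if mud = 0 then g
    else (PySem.List.pyRange d (n + 1) d).foldl (fun g m =>
        PySem.List.pySetD g m
          (PySem.List.pyGetD g m 0 + mud * PySem.List.pyGetD f (PySem.Int.floordiv m d) 0)) g) g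

-- ===== PORT B =====
def mobius_inversion_alt (f : List Int) (mu : List Int) : List Int :=
  let n : Int := (f.length : Int) - 1
  (PySem.List.pyRange 0 (n + 1) 1).map (fun m =>
    (((PySem.List.pyRange 1 (m + 1) 1).filter (fun d => PySem.Int.mod m d == 0)).map
      (fun d => PySem.List.pyGetD mu d 0 * PySem.List.pyGetD f (PySem.Int.floordiv m d) 0)).sum)

-- ===== PRECONDITION & SPEC =====
-- Pre_ excludes exactly the inputs on which Python A raises IndexError: mu[d] is read for every
-- d in 1..len(f)-1, so mu must have at least len(f) entries (vacuous when len(f) ≤ 1); B reads the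
-- same set of indices of mu and raises on the same inputs.
def Pre_mobius_inversion (f : List Int) (mu : List Int) : Prop :=
  f.length ≤ 1 ∨ f.length ≤ mu.length
instance (f : List Int) (mu : List Int) : Decidable (Pre_mobius_inversion f mu) := by
  unfold Pre_mobius_inversion; infer_instance

def pvWitness_mobius_inversion : List Int × List Int := ([0, 1, 3, 4], [1, -1, -1, 0])

def Spec_mobius_inversion (f : List Int) (mu : List Int) (out : List Int) : Prop := out = mobius_inversion_alt f mu
instance (f : List Int) (mu : List Int) (out : List Int) : Decidable (Spec_mobius_inversion f mu out) := by unfold Spec_mobius_inversion; infer_instance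

-- ===== CLAIM (what is proved, stated in full; the proofs are below) =====
def Claim_equal_mobius_inversion : Prop := ∀ (f : List Int) (mu : List Int), Dom_mobius_inversion f mu → Pre_mobius_inversion f mu → Spec_mobius_inversion f mu (mobius_inversion f mu)

-- ===== LEMMAS AND PROOFS =====

-- the contribution of divisor d to entry m, shared by both characterizations
def pvContrib (f mu : List Int) (m d : Int) : Int :=
  if d ∣ m ∧ d ≤ m then PySem.List.pyGetD mu d 0 * PySem.List.pyGetD f (PySem.Int.floordiv m d) 0 else 0

theorem pv_sum_filter_map (p : Int → Bool) (h : Int → Int) :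
    ∀ (L : List Int), ((L.filter p).map h).sum = (L.map (fun d => if p d then h d else 0)).sum := by
  intro L
  induction L with
  | nil => simp
  | cons x L ih =>
    by_cases hx : p x <;> simp [hx, ih]

theorem pv_pyGetD_oob (xs : List Int) (j : Int) (hj : (xs.length : Int) ≤ j) :
    PySem.List.pyGetD xs j 0 = 0 := by
  have hjj : j = ((j.toNat : Nat) : Int) := by omega
  rw [hjj, PySem.List.pyGetD_natCast, List.getD_eq_default]
  omega

-- one in-place scatter pass: each index in the (nodup, in-range) list L gains h of itself once
theorem pv_inner_fold (h : Int → Int) (N : Nat) :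
    ∀ (L : List Int) (g : List Int), g.length = N → L.Nodup → (∀ m ∈ L, 0 ≤ m ∧ m < (N : Int)) →
      (L.foldl (fun g m => PySem.List.pySetD g m (PySem.List.pyGetD g m 0 + h m)) g).length = g.length ∧
      ∀ j : Int, 0 ≤ j →
        PySem.List.pyGetD (L.foldl (fun g m => PySem.List.pySetD g m (PySem.List.pyGetD g m 0 + h m)) g) j 0
          = PySem.List.pyGetD g j 0 + (if j ∈ L then h j else 0) := by
  intro L
  induction L with
  | nil => intro g _ _ _; simp
  | cons x L ih =>
    intro g hgN hnd hb
    have hx := hb x (by simp)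
    have hxx : x = ((x.toNat : Nat) : Int) := by omega
    have hxlt : x.toNat < g.length := by omega
    set g1 := PySem.List.pySetD g x (PySem.List.pyGetD g x 0 + h x) with hg1
    have hlen1 : g1.length = g.length := by
      rw [hg1, hxx, PySem.List.pySetD_natCast]; simp
    have hstep : ∀ j : Int, 0 ≤ j →
        PySem.List.pyGetD g1 j 0 = PySem.List.pyGetD g j 0 + (if j = x then h x else 0) := by
      intro j hj
      by_cases hjl : j < (g.length : Int)
      · have hjj : j = ((j.toNat : Nat) : Int) := by omega
        have key := PySem.List.pyGetD_pySetD_natCast g x.toNat j.toNat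
          (PySem.List.pyGetD g x 0 + h x) 0 hxlt
        rw [hxx] at key
        simp only [Int.toNat_natCast] at key
        rw [hg1, hxx, hjj, key]
        by_cases hje : j.toNat = x.toNat
        · have hcast : ((j.toNat : Nat) : Int) = ((x.toNat : Nat) : Int) := by exact_mod_cast hje
          rw [if_pos hje, hcast, if_pos rfl]
        · have hcast : ¬ ((j.toNat : Nat) : Int) = ((x.toNat : Nat) : Int) := by
            intro h'; exact hje (by exact_mod_cast h')
          rw [if_neg hje, if_neg hcast, add_zero]
      · have hoob : (g.length : Int) ≤ j := by omega
        have hne : ¬ j = x := by omega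
        rw [pv_pyGetD_oob g j hoob, pv_pyGetD_oob g1 j (by rw [hlen1]; exact hoob)]
        rw [if_neg hne, add_zero]
    have hb1 : ∀ m ∈ L, 0 ≤ m ∧ m < (N : Int) := fun m hm => hb m (by simp [hm])
    obtain ⟨ihlen, ihget⟩ := ih g1 (by rw [hlen1, hgN]) (List.Nodup.of_cons hnd) hb1
    refine ⟨?_, ?_⟩
    · simp only [List.foldl_cons]; rw [← hg1, ihlen, hlen1]
    · intro j hj
      simp only [List.foldl_cons]
      rw [← hg1, ihget j hj, hstep j hj]
      by_cases hje : j = x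
      · have hnx : x ∉ L := (List.nodup_cons.mp hnd).1
        simp [hje, hnx]
      · simp [hje]

theorem pv_nodup_pyRange_pos (a b s : Int) (hs : 0 < s) : (PySem.List.pyRange a b s).Nodup := by
  rw [PySem.List.pyRange_of_pos a b hs]
  refine List.Nodup.map ?_ (List.nodup_range)
  intro i j hij
  simp only [add_right_inj] at hij
  have h2 := mul_left_cancel₀ (by omega : s ≠ 0) hij
  exact_mod_cast h2

-- A's outer loop after processing d = 1 .. k: length is preserved and every in-range slot
-- holds the sum of its divisor contributions so far
theorem pv_outer (f mu : List Int) :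
    ∀ (k : Nat),
      ((PySem.List.pyRange 1 (1 + (k : Int)) 1).foldl (fun g d =>
        if PySem.List.pyGetD mu d 0 = 0 then g
        else (PySem.List.pyRange d (((f.length : Int) - 1) + 1) d).foldl (fun g m =>
            PySem.List.pySetD g m
              (PySem.List.pyGetD g m 0 + PySem.List.pyGetD mu d 0 * PySem.List.pyGetD f (PySem.Int.floordiv m d) 0)) g)
        (List.replicate f.length 0)).length = f.length ∧
      ∀ j : Int, 0 ≤ j → j < (f.length : Int) →
        PySem.List.pyGetD ((PySem.List.pyRange 1 (1 + (k : Int)) 1).foldl (fun g d =>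
          if PySem.List.pyGetD mu d 0 = 0 then g
          else (PySem.List.pyRange d (((f.length : Int) - 1) + 1) d).foldl (fun g m =>
              PySem.List.pySetD g m
                (PySem.List.pyGetD g m 0 + PySem.List.pyGetD mu d 0 * PySem.List.pyGetD f (PySem.Int.floordiv m d) 0)) g)
          (List.replicate f.length 0)) j 0
          = ((PySem.List.pyRange 1 (1 + (k : Int)) 1).map (pvContrib f mu j)).sum := by
  intro k
  induction k with
  | zero =>
    simp only [Nat.cast_zero, add_zero]
    rw [PySem.List.pyRange_one_eq_nil le_rfl]
    refine ⟨by simp, ?_⟩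
    intro j hj hjl
    have hjj : j = ((j.toNat : Nat) : Int) := by omega
    simp only [List.foldl_nil, List.map_nil, List.sum_nil]
    rw [hjj, PySem.List.pyGetD_natCast]
    simp only [List.getD, List.getElem?_replicate]
    split <;> simp
  | succ k ih =>
    obtain ⟨ihlen, ihget⟩ := ih
    have harith : (1 : Int) + ((k + 1 : Nat) : Int) = (1 + (k : Int)) + 1 := by push_cast; ring
    rw [harith, PySem.List.pyRange_one_succ_right (show (1:Int) ≤ 1 + (k : Int) by omega)]
    set b : Int := 1 + (k : Int) with hb
    have hbpos : 0 < b := by omega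
    rw [List.foldl_append]
    simp only [List.foldl_cons, List.foldl_nil]
    have hmemb : ∀ j : Int, (j ∈ PySem.List.pyRange b (((f.length : Int) - 1) + 1) b)
        ↔ (b ≤ j ∧ j < (f.length : Int) ∧ b ∣ j) := by
      intro j
      rw [PySem.List.mem_pyRange_iff_of_pos hbpos]
      constructor
      · rintro ⟨h1, h2, h3⟩
        exact ⟨h1, by omega, (dvd_sub_left (dvd_refl b)).mp h3⟩
      · rintro ⟨h1, h2, h3⟩
        exact ⟨h1, by omega, (dvd_sub_left (dvd_refl b)).mpr h3⟩
    by_cases hmu : PySem.List.pyGetD mu b 0 = 0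
    · rw [if_pos hmu]
      refine ⟨ihlen, ?_⟩
      intro j hj hjl
      rw [ihget j hj hjl]
      have hc0 : pvContrib f mu j b = 0 := by
        unfold pvContrib; rw [hmu]; simp
      simp [hc0]
    · rw [if_neg hmu]
      obtain ⟨flen, fget⟩ := pv_inner_fold
        (fun m => PySem.List.pyGetD mu b 0 * PySem.List.pyGetD f (PySem.Int.floordiv m b) 0)
        f.length
        (PySem.List.pyRange b (((f.length : Int) - 1) + 1) b) _
        ihlen
        (pv_nodup_pyRange_pos _ _ _ hbpos)
        (by intro m hm; rw [(hmemb m)] at hm; omega)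
      refine ⟨by rw [flen, ihlen], ?_⟩
      intro j hj hjl
      rw [fget j hj, ihget j hj hjl]
      simp only [List.map_append, List.sum_append, List.map_cons, List.map_nil,
        List.sum_cons, List.sum_nil, add_zero]
      congr 1
      unfold pvContrib
      by_cases hdv : b ∣ j ∧ b ≤ j
      · rw [if_pos ((hmemb j).mpr ⟨hdv.2, hjl, hdv.1⟩), if_pos hdv]
      · rw [if_neg (fun h' => hdv ⟨((hmemb j).mp h').2.2, ((hmemb j).mp h').1⟩), if_neg hdv]

-- B's entry at m equals the same full divisor sum
theorem pv_alt_entry (f mu : List Int) (m : Int) (hm0 : 0 ≤ m) (hml : m < (f.length : Int)) :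
    (((PySem.List.pyRange 1 (m + 1) 1).filter (fun d => PySem.Int.mod m d == 0)).map
      (fun d => PySem.List.pyGetD mu d 0 * PySem.List.pyGetD f (PySem.Int.floordiv m d) 0)).sum
    = ((PySem.List.pyRange 1 (((f.length : Int) - 1) + 1) 1).map (pvContrib f mu m)).sum := by
  rw [pv_sum_filter_map]
  have h1 : (PySem.List.pyRange 1 (m + 1) 1).map
      (fun d => if (PySem.Int.mod m d == 0) then PySem.List.pyGetD mu d 0 * PySem.List.pyGetD f (PySem.Int.floordiv m d) 0 else 0)
      = (PySem.List.pyRange 1 (m + 1) 1).map (pvContrib f mu m) := by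
    apply List.map_congr_left
    intro d hd
    rw [PySem.List.mem_pyRange_one] at hd
    unfold pvContrib
    by_cases hdm : d ∣ m
    · rw [if_pos (by simp [PySem.Int.mod_eq_zero_iff_dvd, hdm]), if_pos ⟨hdm, by omega⟩]
    · rw [if_neg (by simp [PySem.Int.mod_eq_zero_iff_dvd, hdm]), if_neg (fun h' => hdm h'.1)]
  rw [h1]
  rw [PySem.List.pyRange_one_append 1 (m + 1) (((f.length : Int) - 1) + 1) (by omega) (by omega),
    List.map_append, List.sum_append]
  have h2 : (PySem.List.pyRange (m + 1) (((f.length : Int) - 1) + 1) 1).map (pvContrib f mu m)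
      = (PySem.List.pyRange (m + 1) (((f.length : Int) - 1) + 1) 1).map (fun _ => (0 : Int)) := by
    apply List.map_congr_left
    intro d hd
    rw [PySem.List.mem_pyRange_one] at hd
    unfold pvContrib
    rw [if_neg (by rintro ⟨_, h'⟩; omega)]
  rw [h2]
  simp

theorem pv_main (f mu : List Int) : mobius_inversion f mu = mobius_inversion_alt f mu := by
  rcases Nat.eq_zero_or_pos f.length with hf | hf
  · have hf0 : f = [] := List.eq_nil_of_length_eq_zero hf
    subst hf0
    rfl
  · have hA : mobius_inversion f mu
        = (PySem.List.pyRange 1 (((f.length : Int) - 1) + 1) 1).foldl (fun g d =>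
            if PySem.List.pyGetD mu d 0 = 0 then g
            else (PySem.List.pyRange d (((f.length : Int) - 1) + 1) d).foldl (fun g m =>
                PySem.List.pySetD g m
                  (PySem.List.pyGetD g m 0 + PySem.List.pyGetD mu d 0 * PySem.List.pyGetD f (PySem.Int.floordiv m d) 0)) g)
            (List.replicate ((((f.length : Int) - 1) + 1)).toNat 0) := rfl
    have hB : mobius_inversion_alt f mu
        = (PySem.List.pyRange 0 (((f.length : Int) - 1) + 1) 1).map (fun m =>
            (((PySem.List.pyRange 1 (m + 1) 1).filter (fun d => PySem.Int.mod m d == 0)).map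
              (fun d => PySem.List.pyGetD mu d 0 * PySem.List.pyGetD f (PySem.Int.floordiv m d) 0)).sum) := rfl
    have hrepl : ((((f.length : Int) - 1) + 1)).toNat = f.length := by omega
    have hcast : ((f.length : Int) - 1) + 1 = 1 + ((f.length - 1 : Nat) : Int) := by omega
    obtain ⟨hlen, hget⟩ := pv_outer f mu (f.length - 1)
    rw [← hcast] at hlen hget
    rw [hA, hB, hrepl]
    apply List.ext_getElem
    · rw [hlen, List.length_map, PySem.List.length_pyRange_one]
      omega
    · intro i hi1 hi2
      rw [List.getElem_map, PySem.List.getElem_pyRange_one, zero_add]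
      have hi : (i : Int) < (f.length : Int) := by
        rw [hlen] at hi1; exact_mod_cast hi1
      have hA_i : ((PySem.List.pyRange 1 (((f.length : Int) - 1) + 1) 1).foldl (fun g d =>
            if PySem.List.pyGetD mu d 0 = 0 then g
            else (PySem.List.pyRange d (((f.length : Int) - 1) + 1) d).foldl (fun g m =>
                PySem.List.pySetD g m
                  (PySem.List.pyGetD g m 0 + PySem.List.pyGetD mu d 0 * PySem.List.pyGetD f (PySem.Int.floordiv m d) 0)) g)
            (List.replicate f.length 0))[i]
          = PySem.List.pyGetD ((PySem.List.pyRange 1 (((f.length : Int) - 1) + 1) 1).foldl (fun g d =>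
            if PySem.List.pyGetD mu d 0 = 0 then g
            else (PySem.List.pyRange d (((f.length : Int) - 1) + 1) d).foldl (fun g m =>
                PySem.List.pySetD g m
                  (PySem.List.pyGetD g m 0 + PySem.List.pyGetD mu d 0 * PySem.List.pyGetD f (PySem.Int.floordiv m d) 0)) g)
            (List.replicate f.length 0)) (i : Int) 0 := by
        rw [PySem.List.pyGetD_natCast, List.getD_eq_getElem _ _ hi1]
      rw [hA_i, hget (i : Int) (by positivity) hi]
      exact (pv_alt_entry f mu (i : Int) (by positivity) hi).symm

-- ===== VERDICT (by name: the statement is the Claim_ definition above) =====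
theorem mobius_inversion_spec : Claim_equal_mobius_inversion := by
  intro f mu _ _
  unfold Spec_mobius_inversion
  exact pv_main f mu
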